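-- pv_equiv track=rewrite | github.com/K1mcheee/the-chase | backend/benchmarking1.py | lossless_chase
-- ===== SOURCE A (Python) =====
-- def lossless_table(attrs, decom):
--     res = []
--     for i, d in enumerate(decom, start=1):
--         row = {attr: "X" if attr in d else f"{attr}{i}" for attr in attrs}
--         res.append(row)
--     return res
--
-- def lossless_chase(attrs, FD, decom):
--     """Oblivious chase for lossless decomposition checking."""
--     tbl = lossless_table(sorted(attrs), decom)
--     changed = True
--     while changed:
--         changed = False
--         for lhs, rhs in FD:
--             for i, row_i in enumerate(tbl):
--                 for j, row_j in enumerate(tbl):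
--                     if i >= j:
--                         continue
--                     if not all(row_i[attr] == row_j[attr] for attr in lhs):
--                         continue
--                     for attr in rhs:
--                         if row_i[attr] == "X" and row_j[attr] != "X":
--                             row_j[attr] = "X"
--                             changed = True
--                         elif row_j[attr] == "X" and row_i[attr] != "X":
--                             row_i[attr] = "X"
--                             changed = True
--         if any(all(v == "X" for v in row.values()) for row in tbl):
--             return (True, tbl)
--     return (False, tbl)
-- ===== SOURCE B (Python) =====
-- def lossless_table(attrs, decom):
--     res = []
--     for i, d in enumerate(decom, start=1):
--         row = {attr: "X" if attr in d else f"{attr}{i}" for attr in attrs}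
--         res.append(row)
--     return res
--
-- def lossless_chase(attrs, FD, decom):
--     """Oblivious chase; per-FD group propagation instead of the all-pairs scan."""
--     tbl = lossless_table(sorted(attrs), decom)
--     changed = True
--     while changed:
--         changed = False
--         for lhs, rhs in FD:
--             # one scan: which rhs attributes are "X" somewhere in each lhs-value group
--             xat = {}
--             for row in tbl:
--                 k = tuple(row[a] for a in lhs)
--                 s = xat.get(k, set())
--                 for a in rhs:
--                     if row[a] == "X":
--                         s.add(a)
--                 xat[k] = s
--             # one scan: every row absorbs its group's "X" attributes
--             for row in tbl:
--                 s = xat[tuple(row[a] for a in lhs)]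
--                 for a in rhs:
--                     if a in s and row[a] != "X":
--                         row[a] = "X"
--                         changed = True
--         if any(all(v == "X" for v in row.values()) for row in tbl):
--             return (True, tbl)
--     return (False, tbl)
-- ===== Notes on version B (the rewrite author's own statement) =====
-- stated objective: faster
-- what changed: Each FD is applied by one grouping scan (dict: lhs-value tuple -> set of rhs attributes that are X in that group) followed by one per-row absorption scan, replacing A's all-pairs O(rows^2) scan per FD.
-- outside the precondition, e.g. on lossless_chase(['A'], [(['B'], [])], [['A']]): A returns (True, [{'A': 'X'}]), B raises KeyError
import Mathlib
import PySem

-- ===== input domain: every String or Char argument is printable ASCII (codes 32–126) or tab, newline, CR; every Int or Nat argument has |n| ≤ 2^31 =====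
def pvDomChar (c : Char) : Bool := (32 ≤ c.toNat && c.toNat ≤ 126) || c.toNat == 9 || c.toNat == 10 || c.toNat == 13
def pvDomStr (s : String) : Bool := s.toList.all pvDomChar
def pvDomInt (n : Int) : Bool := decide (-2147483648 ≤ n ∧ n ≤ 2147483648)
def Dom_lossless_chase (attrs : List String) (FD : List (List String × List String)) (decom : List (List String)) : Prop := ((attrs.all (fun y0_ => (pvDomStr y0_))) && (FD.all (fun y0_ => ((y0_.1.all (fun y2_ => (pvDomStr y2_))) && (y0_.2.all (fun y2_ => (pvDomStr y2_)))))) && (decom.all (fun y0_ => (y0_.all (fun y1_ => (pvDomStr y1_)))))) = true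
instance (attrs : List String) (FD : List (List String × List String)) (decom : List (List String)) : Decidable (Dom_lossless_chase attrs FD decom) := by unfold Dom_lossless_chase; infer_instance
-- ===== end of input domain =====

-- B replaces A's all-pairs scan per FD by one grouping scan plus one per-row absorption scan (asymptotically faster per pass).
-- Both A and B mutate their row dicts in place in Python; the tuple A returns shares those dicts — the equivalence here is about
-- the returned value.  The Python 'while changed' loop is rendered with fuel rows*|attrs|+1: each repeated iteration turns at
-- least one cell to "X", so the fuel is never exhausted where the Python terminates (same fuel in both ports).

-- ===== PORT A =====
-- shared table builder (helper lossless_table in both Pythons); f"{attr}{i}" is String.mk of the concatenated char lists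
def pvRowVal (d : List String) (i : Int) (a : String) : String :=
  if d.contains a then "X" else String.ofList (a.toList ++ (PySem.Int.toStr i).toList)

def pvTable (attrs : List String) (decom : List (List String)) : List (PySem.Dict String String) :=
  (PySem.List.enumerate decom 1).map (fun p =>
    attrs.foldl (fun r a => r.insert a (pvRowVal p.2 p.1 a)) PySem.Dict.empty)

-- any(all(v == "X" for v in row.values()) for row in tbl)  (same line in both Pythons)
def pvAllX (tbl : List (PySem.Dict String String)) : Bool :=
  tbl.any (fun r => r.values.all (fun v => v == "X"))

-- innermost 'for attr in rhs' body of A: push "X" across the pair (i, j); rows are read from the current table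
-- (indices stay in range, so List.getD/List.set render Python's in-place element access exactly)
def pvPairAttr (i j : Nat) (a : String) (st : List (PySem.Dict String String) × Bool) :
    List (PySem.Dict String String) × Bool :=
  let ri := st.1.getD i PySem.Dict.empty
  let rj := st.1.getD j PySem.Dict.empty
  if ri.getD a "" == "X" && !(rj.getD a "" == "X") then (st.1.set j (rj.insert a "X"), true)
  else if rj.getD a "" == "X" && !(ri.getD a "" == "X") then (st.1.set i (ri.insert a "X"), true)
  else st

-- body of A's double 'for i … for j …' loop (the 'if i >= j: continue' guard first)
def pvPairA (lhs rhs : List String) (i j : Nat) (st : List (PySem.Dict String String) × Bool) :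
    List (PySem.Dict String String) × Bool :=
  if j ≤ i then st
  else
    let ri := st.1.getD i PySem.Dict.empty
    let rj := st.1.getD j PySem.Dict.empty
    if lhs.all (fun a => ri.getD a "" == rj.getD a "") then
      rhs.foldl (fun st a => pvPairAttr i j a st) st
    else st

-- one FD of A: the all-pairs scan
def pvPassA (lhs rhs : List String) (st : List (PySem.Dict String String) × Bool) :
    List (PySem.Dict String String) × Bool :=
  (List.range st.1.length).foldl
    (fun st i => (List.range st.1.length).foldl (fun st j => pvPairA lhs rhs i j st) st) st

-- A's 'while changed' loop (fuel: see header note)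
def pvLoopA (FD : List (List String × List String)) :
    Nat → List (PySem.Dict String String) → Bool × List (PySem.Dict String String)
  | 0, tbl => (false, tbl)
  | fuel + 1, tbl =>
    let st := FD.foldl (fun st p => pvPassA p.1 p.2 st) (tbl, false)
    if pvAllX st.1 then (true, st.1)
    else if st.2 then pvLoopA FD fuel st.1
    else (false, st.1)

def lossless_chase (attrs : List String) (FD : List (List String × List String)) (decom : List (List String)) : Bool × (List (List (String × String))) :=
  let tbl := pvTable (PySem.List.sorted attrs (fun x => x) false) decom
  let r := pvLoopA FD (tbl.length * attrs.length + 1) tbl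
  (r.1, r.2.map (fun d => d.items))

-- ===== PORT B =====
-- tuple(row[a] for a in lhs)
def pvKey (lhs : List String) (r : PySem.Dict String String) : List String :=
  lhs.map (fun a => r.getD a "")

-- B's first scan: xat maps each lhs-value tuple to the set of rhs attributes that are "X" somewhere in its group
def pvXat (lhs rhs : List String) (tbl : List (PySem.Dict String String)) :
    PySem.Dict (List String) (PySem.Set String) :=
  tbl.foldl (fun d r =>
    d.modify (pvKey lhs r) PySem.Set.empty
      (fun s => rhs.foldl (fun s a => if r.getD a "" == "X" then PySem.Set.add s a else s) s)) PySem.Dict.empty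

-- B's inner 'for a in rhs' of the absorption scan, on one row (with the running changed flag)
def pvRowAbsorb (rhs : List String) (s : PySem.Set String) (rc : PySem.Dict String String × Bool) :
    PySem.Dict String String × Bool :=
  rhs.foldl (fun rc a =>
    if PySem.Set.contains s a && !(rc.1.getD a "" == "X") then (rc.1.insert a "X", true) else rc) rc

-- one FD of B: grouping scan, then per-row absorption ('xat[key]' is always present; getD renders the lookup)
def pvPassB (lhs rhs : List String) (st : List (PySem.Dict String String) × Bool) :
    List (PySem.Dict String String) × Bool :=
  let xat := pvXat lhs rhs st.1
  st.1.foldl (fun acc r =>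
    let rc := pvRowAbsorb rhs (xat.getD (pvKey lhs r) PySem.Set.empty) (r, acc.2)
    (acc.1 ++ [rc.1], rc.2)) ([], st.2)

def pvLoopB (FD : List (List String × List String)) :
    Nat → List (PySem.Dict String String) → Bool × List (PySem.Dict String String)
  | 0, tbl => (false, tbl)
  | fuel + 1, tbl =>
    let st := FD.foldl (fun st p => pvPassB p.1 p.2 st) (tbl, false)
    if pvAllX st.1 then (true, st.1)
    else if st.2 then pvLoopB FD fuel st.1
    else (false, st.1)

def lossless_chase_alt (attrs : List String) (FD : List (List String × List String)) (decom : List (List String)) : Bool × (List (List (String × String))) :=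
  let tbl := pvTable (PySem.List.sorted attrs (fun x => x) false) decom
  let r := pvLoopB FD (tbl.length * attrs.length + 1) tbl
  (r.1, r.2.map (fun d => d.items))

-- ===== PRECONDITION & SPEC =====
-- Pre_ excludes FDs mentioning an attribute outside attrs when the table is non-empty: there row[attr] raises KeyError —
-- A as soon as it reaches that attribute of a pair of rows, B on any row — and where A does return on such inputs (fewer
-- than two rows, or no pair ever agrees on the lhs) it is only by accident of its pair loop never touching the bad
-- attribute.  With an empty decom both programs return (False, []) without touching the FDs, so it is admitted.
def Pre_lossless_chase (attrs : List String) (FD : List (List String × List String)) (decom : List (List String)) : Prop :=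
  decom = [] ∨ ∀ p ∈ FD, (∀ a ∈ p.1, a ∈ attrs) ∧ (∀ a ∈ p.2, a ∈ attrs)

instance (attrs : List String) (FD : List (List String × List String)) (decom : List (List String)) : Decidable (Pre_lossless_chase attrs FD decom) := by unfold Pre_lossless_chase; infer_instance

def pvWitness_lossless_chase : List String × (List (List String × List String)) × List (List String) :=
  (["A", "B", "C"], [(["B"], ["C"])], [["A", "B"], ["B", "C"]])

def Spec_lossless_chase (attrs : List String) (FD : List (List String × List String)) (decom : List (List String)) (out : Bool × (List (List (String × String)))) : Prop := out = lossless_chase_alt attrs FD decom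
instance (attrs : List String) (FD : List (List String × List String)) (decom : List (List String)) (out : Bool × (List (List (String × String)))) : Decidable (Spec_lossless_chase attrs FD decom out) := by unfold Spec_lossless_chase; infer_instance

-- ===== CLAIM (what is proved, stated in full; the proofs are below) =====
def Claim_equal_lossless_chase : Prop := ∀ (attrs : List String) (FD : List (List String × List String)) (decom : List (List String)), Dom_lossless_chase attrs FD decom → Pre_lossless_chase attrs FD decom → Spec_lossless_chase attrs FD decom (lossless_chase attrs FD decom)

-- ===== LEMMAS AND PROOFS =====

def pvSetXs (r : PySem.Dict String String) (p : String → Bool) : PySem.Dict String String :=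
  PySem.Dict.mk (r.items.map (fun q => (q.1, if p q.1 then "X" else q.2)))

theorem pv_get?_of_contains (d : PySem.Dict String String) (a : String)
    (h : d.contains a = true) : d.get? a = some (d.getD a "") := by
  have hc := PySem.Dict.contains_eq_isSome_get? (d := d) (k := a)
  rw [hc] at h
  rcases Option.isSome_iff_exists.mp h with ⟨v, hv⟩
  rw [hv, PySem.Dict.getD_eq_get?_getD, hv]; rfl

theorem pv_dict_eq_of_keys_getD (d d' : PySem.Dict String String)
    (hk : d.keys = d'.keys) (hn : d.keys.Nodup)
    (h : ∀ a, d.getD a "" = d'.getD a "") : d = d' := by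
  apply PySem.Dict.ext
  rw [PySem.Dict.items_eq_map_keys d hn "", PySem.Dict.items_eq_map_keys d' (hk ▸ hn) "", hk]
  exact List.map_congr_left (fun k _ => by rw [h k])

theorem pv_keys_setXs (r : PySem.Dict String String) (p : String → Bool) :
    (pvSetXs r p).keys = r.keys := by
  simp [pvSetXs, PySem.Dict.keys]

theorem pv_get?_setXs (r : PySem.Dict String String) (p : String → Bool) (a : String) :
    (pvSetXs r p).get? a = (r.get? a).map (fun v => if p a then "X" else v) := by
  obtain ⟨l⟩ := r
  induction l with
  | nil => simp [pvSetXs, PySem.Dict.get?]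
  | cons q l ih =>
    show (PySem.Dict.mk ((q :: l).map (fun q => (q.1, if p q.1 then "X" else q.2)))).get? a = _
    rw [List.map_cons]
    rw [PySem.Dict.get?_mk_cons, PySem.Dict.get?_mk_cons]
    by_cases hqa : (q.1 == a) = true
    · have heq : q.1 = a := beq_iff_eq.mp hqa
      simp [heq]
    · simp only [eq_false_of_ne_true hqa, Bool.false_eq_true, if_false]
      simpa [pvSetXs] using ih

theorem pv_contains_setXs (r : PySem.Dict String String) (p : String → Bool) (a : String) :
    (pvSetXs r p).contains a = r.contains a := by
  rw [PySem.Dict.contains_eq_decide_mem_keys, PySem.Dict.contains_eq_decide_mem_keys, pv_keys_setXs]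

theorem pv_getD_setXs (r : PySem.Dict String String) (p : String → Bool) (a : String) :
    (pvSetXs r p).getD a "" = if r.contains a then (if p a then "X" else r.getD a "") else "" := by
  by_cases h : r.contains a
  · rw [PySem.Dict.getD_eq_get?_getD, pv_get?_setXs, pv_get?_of_contains r a h]
    simp [h]
  · have h' : r.contains a = false := eq_false_of_ne_true h
    simp only [h', Bool.false_eq_true, if_false]
    exact PySem.Dict.getD_of_not_contains _ _ (by rw [pv_contains_setXs, h'])

theorem pv_mem_foldl_addIf (rhs : List String) (r : PySem.Dict String String)
    (s : PySem.Set String) (a : String) :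
    (a ∈ rhs.foldl (fun s x => if r.getD x "" == "X" then PySem.Set.add s x else s) s)
      ↔ a ∈ s ∨ (a ∈ rhs ∧ r.getD a "" = "X") := by
  induction rhs generalizing s with
  | nil => simp
  | cons x rhs ih =>
    simp only [List.foldl_cons]
    by_cases hx : r.getD x "" = "X"
    · rw [ih]
      simp only [if_pos (beq_iff_eq.mpr hx), PySem.Set.mem_add]
      constructor
      · rintro (⟨h | rfl⟩ | ⟨h1, h2⟩)
        · exact Or.inl h
        · exact Or.inr ⟨List.mem_cons_self, hx⟩
        · exact Or.inr ⟨List.mem_cons_of_mem _ h1, h2⟩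
      · rintro (h | ⟨h1, h2⟩)
        · exact Or.inl (Or.inl h)
        · rcases List.mem_cons.mp h1 with rfl | h1
          · exact Or.inl (Or.inr rfl)
          · exact Or.inr ⟨h1, h2⟩
    · rw [if_neg (by simpa using hx), ih]
      constructor
      · rintro (h | ⟨h1, h2⟩)
        · exact Or.inl h
        · exact Or.inr ⟨List.mem_cons_of_mem _ h1, h2⟩
      · rintro (h | ⟨h1, h2⟩)
        · exact Or.inl h
        · rcases List.mem_cons.mp h1 with rfl | h1
          · exact absurd h2 hx
          · exact Or.inr ⟨h1, h2⟩

theorem pv_mem_xat_gen (lhs rhs : List String) (l : List (PySem.Dict String String))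
    (d : PySem.Dict (List String) (PySem.Set String)) (K : List String) (a : String) :
    (a ∈ (l.foldl (fun d r =>
      d.modify (pvKey lhs r) PySem.Set.empty
        (fun s => rhs.foldl (fun s a => if r.getD a "" == "X" then PySem.Set.add s a else s) s)) d).getD K PySem.Set.empty)
    ↔ a ∈ d.getD K PySem.Set.empty ∨ ∃ m ∈ l, pvKey lhs m = K ∧ a ∈ rhs ∧ m.getD a "" = "X" := by
  induction l generalizing d with
  | nil => simp
  | cons r l ih =>
    simp only [List.foldl_cons]
    rw [ih]
    rw [PySem.Dict.getD_modify]
    by_cases hK : K = pvKey lhs r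
    · subst hK
      rw [if_pos rfl, pv_mem_foldl_addIf]
      constructor
      · rintro ((h | ⟨h1, h2⟩) | ⟨m, hm, h3⟩)
        · exact Or.inl h
        · exact Or.inr ⟨r, List.mem_cons_self, rfl, h1, h2⟩
        · exact Or.inr ⟨m, List.mem_cons_of_mem _ hm, h3⟩
      · rintro (h | ⟨m, hm, h3, h4, h5⟩)
        · exact Or.inl (Or.inl h)
        · rcases List.mem_cons.mp hm with rfl | hm
          · exact Or.inl (Or.inr ⟨h4, h5⟩)
          · exact Or.inr ⟨m, hm, h3, h4, h5⟩
    · rw [if_neg hK]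
      constructor
      · rintro (h | ⟨m, hm, h3⟩)
        · exact Or.inl h
        · exact Or.inr ⟨m, List.mem_cons_of_mem _ hm, h3⟩
      · rintro (h | ⟨m, hm, h3, h4, h5⟩)
        · exact Or.inl h
        · rcases List.mem_cons.mp hm with rfl | hm
          · exact absurd h3.symm hK
          · exact Or.inr ⟨m, hm, h3, h4, h5⟩

theorem pv_mem_xat (lhs rhs : List String) (tbl : List (PySem.Dict String String)) (K : List String) (a : String) :
    (a ∈ (pvXat lhs rhs tbl).getD K PySem.Set.empty)
    ↔ ∃ m ∈ tbl, pvKey lhs m = K ∧ a ∈ rhs ∧ m.getD a "" = "X" := by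
  rw [pvXat, pv_mem_xat_gen]
  simp [PySem.Set.empty, PySem.Dict.getD_empty]

theorem pv_rowAbsorb_flag_indep (rhs : List String) (s : PySem.Set String)
    (r : PySem.Dict String String) (c : Bool) :
    pvRowAbsorb rhs s (r, c) = ((pvRowAbsorb rhs s (r, false)).1, c || (pvRowAbsorb rhs s (r, false)).2) := by
  induction rhs generalizing r c with
  | nil => simp [pvRowAbsorb]
  | cons x rhs ih =>
    simp only [pvRowAbsorb, List.foldl_cons] at *
    by_cases hx : (PySem.Set.contains s x && !(r.getD x "" == "X")) = true
    · rw [if_pos hx, if_pos hx]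
      rw [ih (r.insert x "X") true]
      simp
    · rw [if_neg hx, if_neg hx]
      exact ih r c

theorem pv_rowAbsorb_spec (rhs : List String) (s : PySem.Set String)
    (r : PySem.Dict String String) (c : Bool)
    (hc : ∀ a ∈ rhs, r.contains a = true) :
    (pvRowAbsorb rhs s (r, c)).1.keys = r.keys ∧
    (∀ a, (pvRowAbsorb rhs s (r, c)).1.getD a "" =
      if decide (a ∈ rhs) && PySem.Set.contains s a then "X" else r.getD a "") ∧
    ((pvRowAbsorb rhs s (r, c)).2 = (c || decide (∃ a ∈ rhs, PySem.Set.contains s a = true ∧ r.getD a "" ≠ "X"))) := by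
  induction rhs generalizing r c with
  | nil => simp [pvRowAbsorb]
  | cons x rhs ih =>
    have hcx : r.contains x = true := hc x List.mem_cons_self
    have hc' : ∀ a ∈ rhs, r.contains a = true := fun a ha => hc a (List.mem_cons_of_mem _ ha)
    simp only [pvRowAbsorb, List.foldl_cons] at *
    by_cases hx : (PySem.Set.contains s x && !(r.getD x "" == "X")) = true
    · rw [if_pos hx]
      obtain ⟨hcon, hne⟩ : PySem.Set.contains s x = true ∧ r.getD x "" ≠ "X" := by
        simpa using hx
      have hc'' : ∀ a ∈ rhs, (r.insert x "X").contains a = true := by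
        intro a ha
        rw [PySem.Dict.contains_insert]
        simp [hc' a ha]
      obtain ⟨k1, k2, k3⟩ := ih (r.insert x "X") true hc''
      refine ⟨?_, ?_, ?_⟩
      · rw [k1, PySem.Dict.keys_insert_of_contains _ _ hcx]
      · intro a
        rw [k2 a, PySem.Dict.getD_insert]
        by_cases hax : a = x
        · subst hax
          have hmem : a ∈ s := by simpa using hcon
          simp [hmem]
        · simp only [if_neg hax]
          by_cases har : a ∈ rhs
          · simp [har, List.mem_cons, hax]
          · simp [har, hax]
      · rw [k3]
        have hmem : x ∈ s := by simpa using hcon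
        simp [hmem, hne]
    · rw [if_neg hx]
      obtain ⟨k1, k2, k3⟩ := ih r c hc'
      have hx' : PySem.Set.contains s x = false ∨ r.getD x "" = "X" := by
        by_cases h1 : PySem.Set.contains s x = true
        · right; by_contra h2
          exact hx (by simp [show x ∈ s from by simpa using h1, h2])
        · left; exact eq_false_of_ne_true h1
      have hx'' : x ∉ s ∨ r.getD x "" = "X" := by
        rcases hx' with h | h
        · exact Or.inl (by simpa using h)
        · exact Or.inr h
      refine ⟨k1, ?_, ?_⟩
      · intro a
        rw [k2 a]
        by_cases hax : a = x
        · subst hax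
          rcases hx'' with h | h
          · simp [h]
          · simp [h]
        · by_cases har : a ∈ rhs
          · simp [har, List.mem_cons, hax]
          · simp [har, List.mem_cons, hax]
      · rw [k3]
        congr 1
        rw [decide_eq_decide]
        constructor
        · rintro ⟨a, ha, h1, h2⟩
          exact ⟨a, List.mem_cons_of_mem _ ha, h1, h2⟩
        · rintro ⟨a, ha, h1, h2⟩
          rcases List.mem_cons.mp ha with rfl | ha
          · rcases hx' with h | h
            · rw [h1] at h; cases h
            · exact absurd h h2
          · exact ⟨a, ha, h1, h2⟩

def pvHasX (lhs : List String) (tbl : List (PySem.Dict String String)) (r : PySem.Dict String String) (a : String) : Bool :=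
  tbl.any (fun m => pvKey lhs m == pvKey lhs r && m.getD a "" == "X")

def pvFlag (lhs rhs : List String) (tbl : List (PySem.Dict String String)) (r : PySem.Dict String String) (a : String) : Bool :=
  rhs.contains a && pvHasX lhs tbl r a

def pvSpecRow (lhs rhs : List String) (tbl : List (PySem.Dict String String)) (r : PySem.Dict String String) : PySem.Dict String String :=
  pvSetXs r (pvFlag lhs rhs tbl r)

def pvSpecTbl (lhs rhs : List String) (tbl : List (PySem.Dict String String)) : List (PySem.Dict String String) :=
  tbl.map (pvSpecRow lhs rhs tbl)

def pvChSpec (lhs rhs : List String) (tbl : List (PySem.Dict String String)) : Bool :=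
  tbl.any (fun r => rhs.any (fun a => pvHasX lhs tbl r a && !(r.getD a "" == "X")))

def pvRowsOK (lhs rhs : List String) (tbl : List (PySem.Dict String String)) : Prop :=
  (∀ r ∈ tbl, r.keys.Nodup) ∧ (∀ r ∈ tbl, ∀ a, a ∈ lhs ∨ a ∈ rhs → r.contains a = true)

theorem pv_and_true {a b : Bool} (h : (a && b) = true) : a = true ∧ b = true := by
  simpa using h

theorem pv_contains_list {l : List String} {a : String} : l.contains a = true ↔ a ∈ l :=
  List.contains_iff_mem

theorem pv_s_contains (lhs rhs : List String) (tbl : List (PySem.Dict String String))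
    (r : PySem.Dict String String) (a : String) :
    PySem.Set.contains ((pvXat lhs rhs tbl).getD (pvKey lhs r) PySem.Set.empty) a
      = pvFlag lhs rhs tbl r a := by
  rw [Bool.eq_iff_iff]
  rw [show (PySem.Set.contains ((pvXat lhs rhs tbl).getD (pvKey lhs r) PySem.Set.empty) a = true)
      ↔ a ∈ (pvXat lhs rhs tbl).getD (pvKey lhs r) PySem.Set.empty from by simp]
  rw [pv_mem_xat]
  constructor
  · rintro ⟨m, hm, hk, ha, hX⟩
    have h1 : rhs.contains a = true := pv_contains_list.mpr ha
    have h2 : pvHasX lhs tbl r a = true := by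
      rw [pvHasX, List.any_eq_true]
      exact ⟨m, hm, by simp [hk, hX]⟩
    rw [pvFlag, h1, h2]
    rfl
  · intro h
    obtain ⟨h1, h2⟩ := pv_and_true h
    rw [pvHasX, List.any_eq_true] at h2
    obtain ⟨m, hm, h3⟩ := h2
    obtain ⟨h4, h5⟩ := pv_and_true h3
    exact ⟨m, hm, beq_iff_eq.mp h4, pv_contains_list.mp h1, beq_iff_eq.mp h5⟩

theorem pv_rowAbsorb_row (lhs rhs : List String) (tbl : List (PySem.Dict String String))
    (r : PySem.Dict String String) (hnd : r.keys.Nodup)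
    (hct : ∀ a ∈ rhs, r.contains a = true) :
    (pvRowAbsorb rhs ((pvXat lhs rhs tbl).getD (pvKey lhs r) PySem.Set.empty) (r, false)).1
      = pvSpecRow lhs rhs tbl r := by
  obtain ⟨k1, k2, _⟩ := pv_rowAbsorb_spec rhs _ r false hct
  apply pv_dict_eq_of_keys_getD _ _ (by rw [k1, pvSpecRow, pv_keys_setXs]) (by rw [k1]; exact hnd)
  intro a
  rw [k2 a, pvSpecRow, pv_getD_setXs, pv_s_contains]
  by_cases hcr : r.contains a = true
  · rw [if_pos hcr]
    by_cases hfl : pvFlag lhs rhs tbl r a = true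
    · have hfl' : (rhs.contains a && pvHasX lhs tbl r a) = true := hfl
      have har : a ∈ rhs := pv_contains_list.mp (pv_and_true hfl').1
      simp [hfl, har]
    · simp [eq_false_of_ne_true hfl]
  · have hcr' : r.contains a = false := eq_false_of_ne_true hcr
    rw [if_neg hcr]
    have har : a ∉ rhs := fun h => hcr (hct a h)
    have hfl : pvFlag lhs rhs tbl r a = false := by
      have : rhs.contains a = false := by
        rcases Bool.eq_false_or_eq_true (rhs.contains a) with h | h
        · exact absurd (pv_contains_list.mp h) har
        · exact h
      rw [pvFlag, this, Bool.false_and]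
    simp [hfl, PySem.Dict.getD_of_not_contains _ _ hcr']

theorem pv_rowAbsorb_flag (lhs rhs : List String) (tbl : List (PySem.Dict String String))
    (r : PySem.Dict String String) (hct : ∀ a ∈ rhs, r.contains a = true) :
    (pvRowAbsorb rhs ((pvXat lhs rhs tbl).getD (pvKey lhs r) PySem.Set.empty) (r, false)).2
      = rhs.any (fun a => pvHasX lhs tbl r a && !(r.getD a "" == "X")) := by
  obtain ⟨_, _, k3⟩ := pv_rowAbsorb_spec rhs _ r false hct
  rw [k3, Bool.false_or, Bool.eq_iff_iff]
  simp only [decide_eq_true_eq, List.any_eq_true, Bool.and_eq_true]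
  constructor
  · rintro ⟨a, ha, h1, h2⟩
    rw [pv_s_contains] at h1
    refine ⟨a, ha, (pv_and_true h1).2, by simpa using h2⟩
  · rintro ⟨a, ha, h1, h2⟩
    refine ⟨a, ha, ?_, by simpa using h2⟩
    rw [pv_s_contains, pvFlag]
    have hca : rhs.contains a = true := pv_contains_list.mpr ha
    rw [hca, h1]
    rfl

theorem pv_passB_fold (lhs rhs : List String) (tbl : List (PySem.Dict String String))
    (hnd : ∀ r ∈ tbl, r.keys.Nodup) (hct : ∀ r ∈ tbl, ∀ a ∈ rhs, r.contains a = true) :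
    ∀ (l : List (PySem.Dict String String)) (acc : List (PySem.Dict String String)) (c : Bool),
      (∀ r ∈ l, r ∈ tbl) →
      l.foldl (fun acc r =>
          let rc := pvRowAbsorb rhs ((pvXat lhs rhs tbl).getD (pvKey lhs r) PySem.Set.empty) (r, acc.2)
          (acc.1 ++ [rc.1], rc.2)) (acc, c)
        = (acc ++ l.map (pvSpecRow lhs rhs tbl),
           c || l.any (fun r => rhs.any (fun a => pvHasX lhs tbl r a && !(r.getD a "" == "X")))) := by
  intro l
  induction l with
  | nil => intro acc c _; simp
  | cons r l ih =>
    intro acc c hmem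
    have hr : r ∈ tbl := hmem r List.mem_cons_self
    simp only [List.foldl_cons]
    rw [pv_rowAbsorb_flag_indep]
    rw [pv_rowAbsorb_row lhs rhs tbl r (hnd r hr) (hct r hr)]
    rw [pv_rowAbsorb_flag lhs rhs tbl r (hct r hr)]
    rw [ih (acc ++ [pvSpecRow lhs rhs tbl r]) _ (fun r' h => hmem r' (List.mem_cons_of_mem _ h))]
    simp [Bool.or_assoc]

theorem pvPassB_spec (lhs rhs : List String) (tbl : List (PySem.Dict String String)) (c : Bool)
    (h : pvRowsOK lhs rhs tbl) :
    pvPassB lhs rhs (tbl, c) = (pvSpecTbl lhs rhs tbl, c || pvChSpec lhs rhs tbl) := by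
  rw [pvPassB]
  exact pv_passB_fold lhs rhs tbl h.1 (fun r hr a ha => h.2 r hr a (Or.inr ha)) tbl [] c (fun _ h => h)

-- ===== A side =====

def pvRowAt (T : List (PySem.Dict String String)) (k : Nat) : PySem.Dict String String :=
  T.getD k PySem.Dict.empty

def InvA (lhs rhs : List String) (tbl : List (PySem.Dict String String))
    (D : Nat → Nat → Prop) (st : List (PySem.Dict String String) × Bool) (c0 : Bool) : Prop :=
  st.1.length = tbl.length ∧
  (∀ k, (pvRowAt st.1 k).keys = (pvRowAt tbl k).keys) ∧
  (∀ k a, (pvRowAt st.1 k).getD a "" = (pvRowAt tbl k).getD a ""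
      ∨ ((pvRowAt st.1 k).getD a "" = "X" ∧ pvFlag lhs rhs tbl (pvRowAt tbl k) a = true)) ∧
  (∀ p q, D p q → p < q → q < tbl.length →
      pvKey lhs (pvRowAt tbl p) = pvKey lhs (pvRowAt tbl q) →
      ∀ a ∈ rhs, ((pvRowAt tbl p).getD a "" = "X" ∨ (pvRowAt tbl q).getD a "" = "X") →
        ((pvRowAt st.1 p).getD a "" = "X" ∧ (pvRowAt st.1 q).getD a "" = "X")) ∧
  (st.2 = true ↔ c0 = true ∨ ∃ k a, (pvRowAt st.1 k).getD a "" ≠ (pvRowAt tbl k).getD a "")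

theorem pv_getD_set (T : List (PySem.Dict String String)) (j k : Nat) (v : PySem.Dict String String) :
    pvRowAt (T.set j v) k = if k = j ∧ j < T.length then v else pvRowAt T k := by
  simp only [pvRowAt, List.getD_eq_getElem?_getD, List.getElem?_set]
  split_ifs with h1 h2 h3 <;> first
  | rfl
  | simp_all

-- the second disjunct of soundness never changes a value that is already right:
-- an "X" in the original row stays "X" (both disjuncts give "X")

theorem pv_sound_mono {lhs rhs : List String} {tbl T : List (PySem.Dict String String)}
    (hs : ∀ k a, (pvRowAt T k).getD a "" = (pvRowAt tbl k).getD a ""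
      ∨ ((pvRowAt T k).getD a "" = "X" ∧ pvFlag lhs rhs tbl (pvRowAt tbl k) a = true))
    (k : Nat) (a : String) (h : (pvRowAt tbl k).getD a "" = "X") :
    (pvRowAt T k).getD a "" = "X" := by
  rcases hs k a with h' | ⟨h', _⟩
  · rw [h', h]
  · exact h'

theorem pv_map_eq_forall {α β : Type} {f g : α → β} {l : List α}
    (h : l.map f = l.map g) : ∀ a ∈ l, f a = g a := by
  induction l with
  | nil => intro a ha; cases ha
  | cons x l ih =>
    simp only [List.map_cons, List.cons.injEq] at h
    intro a ha
    rcases List.mem_cons.mp ha with rfl | ha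
    · exact h.1
    · exact ih h.2 a ha

-- lhs-values never move during a pass: the current key of every row equals its original key

theorem pv_key_static {lhs rhs : List String} {tbl T : List (PySem.Dict String String)}
    (hs : ∀ k a, (pvRowAt T k).getD a "" = (pvRowAt tbl k).getD a ""
      ∨ ((pvRowAt T k).getD a "" = "X" ∧ pvFlag lhs rhs tbl (pvRowAt tbl k) a = true))
    (k : Nat) : pvKey lhs (pvRowAt T k) = pvKey lhs (pvRowAt tbl k) := by
  unfold pvKey
  apply List.map_congr_left
  intro a ha
  rcases hs k a with h | ⟨h1, h2⟩
  · exact h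
  · -- a is in lhs and the current value is "X"; the flag says some same-key row has "X" at a,
    -- but a same-key row agrees at every lhs attribute, so the original value is already "X"
    obtain ⟨hc, hx⟩ := pv_and_true h2
    rw [pvHasX, List.any_eq_true] at hx
    obtain ⟨m, hm, hmx⟩ := hx
    obtain ⟨hk, hX⟩ := pv_and_true hmx
    have hkey : pvKey lhs m = pvKey lhs (pvRowAt tbl k) := beq_iff_eq.mp hk
    have := pv_map_eq_forall hkey a ha
    rw [h1, ← this, beq_iff_eq.mp hX]

theorem pv_hasX_congr (lhs : List String) (tbl : List (PySem.Dict String String))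
    {r r' : PySem.Dict String String} (h : pvKey lhs r = pvKey lhs r') (a : String) :
    pvHasX lhs tbl r a = pvHasX lhs tbl r' a := by
  rw [pvHasX, pvHasX, h]

theorem pv_contains_rowAt {lhs rhs : List String} {tbl : List (PySem.Dict String String)}
    (hok : pvRowsOK lhs rhs tbl) {k : Nat} (hk : k < tbl.length) {a : String}
    (ha : a ∈ lhs ∨ a ∈ rhs) : (pvRowAt tbl k).contains a = true := by
  have hmem : pvRowAt tbl k ∈ tbl := by
    rw [pvRowAt, List.getD_eq_getElem?_getD, List.getElem?_eq_getElem hk]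
    exact List.getElem_mem hk
  exact hok.2 _ hmem a ha

theorem pv_nodup_rowAt {lhs rhs : List String} {tbl : List (PySem.Dict String String)}
    (hok : pvRowsOK lhs rhs tbl) {k : Nat} (hk : k < tbl.length) :
    (pvRowAt tbl k).keys.Nodup := by
  have hmem : pvRowAt tbl k ∈ tbl := by
    rw [pvRowAt, List.getD_eq_getElem?_getD, List.getElem?_eq_getElem hk]
    exact List.getElem_mem hk
  exact hok.1 _ hmem

theorem pv_pairAttr_reduce (i j : Nat) (a : String) (T : List (PySem.Dict String String)) (ch : Bool) :
    pvPairAttr i j a (T, ch) =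
      if (pvRowAt T i).getD a "" = "X" ∧ (pvRowAt T j).getD a "" ≠ "X" then
        (T.set j ((pvRowAt T j).insert a "X"), true)
      else if (pvRowAt T j).getD a "" = "X" ∧ (pvRowAt T i).getD a "" ≠ "X" then
        (T.set i ((pvRowAt T i).insert a "X"), true)
      else (T, ch) := by
  simp [pvPairAttr, pvRowAt]

theorem pv_pairAttr_inv (lhs rhs : List String) (tbl : List (PySem.Dict String String))
    (hok : pvRowsOK lhs rhs tbl) (D : Nat → Nat → Prop) (c0 : Bool) (i j : Nat)
    (hij : i < j) (hj : j < tbl.length) (a : String) (ha : a ∈ rhs)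
    (hkeq : pvKey lhs (pvRowAt tbl i) = pvKey lhs (pvRowAt tbl j))
    (st : List (PySem.Dict String String) × Bool) (hInv : InvA lhs rhs tbl D st c0) :
    InvA lhs rhs tbl D (pvPairAttr i j a st) c0 ∧
    ((pvRowAt (pvPairAttr i j a st).1 i).getD a "" = "X"
       ↔ (pvRowAt (pvPairAttr i j a st).1 j).getD a "" = "X") := by
  obtain ⟨T, ch⟩ := st
  obtain ⟨I1, I2, I3, I4, I6⟩ := hInv
  simp only at I1 I2 I3 I4 I6
  have hi : i < tbl.length := lt_trans hij hj
  have hij' : i ≠ j := Nat.ne_of_lt hij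
  have hci : (pvRowAt tbl i).contains a = true := pv_contains_rowAt hok hi (Or.inr ha)
  have hcj : (pvRowAt tbl j).contains a = true := pv_contains_rowAt hok hj (Or.inr ha)
  have hcti : (pvRowAt T i).contains a = true := by
    rw [PySem.Dict.contains_eq_decide_mem_keys, I2 i, ← PySem.Dict.contains_eq_decide_mem_keys]
    exact hci
  have hctj : (pvRowAt T j).contains a = true := by
    rw [PySem.Dict.contains_eq_decide_mem_keys, I2 j, ← PySem.Dict.contains_eq_decide_mem_keys]
    exact hcj
  have hje : j < T.length := by rw [I1]; exact hj
  have hrc : rhs.contains a = true := pv_contains_list.mpr ha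
  -- the flag holds at both rows as soon as one current side is "X"
  have flag_of_cur : ∀ k, k < tbl.length → (pvRowAt T k).getD a "" = "X" →
      ∀ k', pvKey lhs (pvRowAt tbl k) = pvKey lhs (pvRowAt tbl k') →
      pvFlag lhs rhs tbl (pvRowAt tbl k') a = true := by
    intro k hk hX k' hkk
    rw [pvFlag, hrc, Bool.true_and, ← pv_hasX_congr lhs tbl hkk a, pvHasX, List.any_eq_true]
    rcases I3 k a with h | ⟨_, hfl⟩
    · refine ⟨pvRowAt tbl k, ?_, by simp [h ▸ hX]⟩
      rw [pvRowAt, List.getD_eq_getElem?_getD, List.getElem?_eq_getElem hk]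
      exact List.getElem_mem hk
    · have := (pv_and_true hfl).2
      rw [pvHasX, List.any_eq_true] at this
      exact this
  -- a cell that is "X" stays "X" after setting one row to an insert of "X"
  have mono_set : ∀ (m : Nat) (r' : PySem.Dict String String),
      (∀ b, r'.getD b "" = (pvRowAt T m).getD b "" ∨ r'.getD b "" = "X") →
      ∀ k b, (pvRowAt T k).getD b "" = "X" → (pvRowAt (T.set m r') k).getD b "" = "X" := by
    intro m r' hr k b hX
    rw [pv_getD_set]
    split_ifs with h
    · rcases hr b with h' | h'
      · rw [h', ← h.1]; exact hX
      · exact h'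
    · exact hX
  by_cases h1 : (pvRowAt T i).getD a "" = "X" <;> by_cases h2 : (pvRowAt T j).getD a "" = "X"
  · -- both already "X": no change
    have : pvPairAttr i j a (T, ch) = (T, ch) := by
      rw [pv_pairAttr_reduce, if_neg (by tauto), if_neg (by tauto)]
    rw [this]
    exact ⟨⟨I1, I2, I3, I4, I6⟩, by rw [h1, h2]⟩
  · -- i is "X", j is not: set row j
    have hstep : pvPairAttr i j a (T, ch) = (T.set j ((pvRowAt T j).insert a "X"), true) := by
      rw [pv_pairAttr_reduce, if_pos ⟨h1, h2⟩]
    rw [hstep]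
    have horigj : (pvRowAt tbl j).getD a "" ≠ "X" := by
      rcases I3 j a with h | ⟨h, _⟩
      · rw [← h]; exact h2
      · exact absurd h h2
    have hflagj : pvFlag lhs rhs tbl (pvRowAt tbl j) a = true := flag_of_cur i hi h1 j hkeq
    have hrow : ∀ b, ((pvRowAt T j).insert a "X").getD b "" =
        if b = a then "X" else (pvRowAt T j).getD b "" := by
      intro b; rw [PySem.Dict.getD_insert]
    have hmono : ∀ k b, (pvRowAt T k).getD b "" = "X" →
        (pvRowAt (T.set j ((pvRowAt T j).insert a "X")) k).getD b "" = "X" := by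
      apply mono_set
      intro b; rw [hrow b]; split_ifs with h
      · exact Or.inr rfl
      · exact Or.inl rfl
    refine ⟨⟨by simpa using I1, ?_, ?_, ?_, ?_⟩, ?_⟩
    · intro k
      rw [pv_getD_set]
      split_ifs with h
      · rw [PySem.Dict.keys_insert_of_contains _ _ hctj, h.1, I2 j]
      · exact I2 k
    · intro k b
      rw [pv_getD_set]
      split_ifs with h
      · rw [hrow b]
        split_ifs with hba
        · subst hba; rw [h.1]; exact Or.inr ⟨rfl, hflagj⟩
        · rw [h.1]; exact I3 j b
      · exact I3 k b
    · intro p q hD hpq hq hkpq b hb hX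
      obtain ⟨hXp, hXq⟩ := I4 p q hD hpq hq hkpq b hb hX
      exact ⟨hmono p b hXp, hmono q b hXq⟩
    · simp only
      constructor
      · intro _
        right
        refine ⟨j, a, ?_⟩
        rw [pv_getD_set, if_pos ⟨rfl, hje⟩, hrow a, if_pos rfl]
        exact fun h => horigj h.symm
      · intro _; trivial
    · simp only
      have hii : (pvRowAt (T.set j ((pvRowAt T j).insert a "X")) i).getD a "" = "X" := by
        rw [pv_getD_set, if_neg (fun h => hij' h.1)]
        exact h1
      have hjj : (pvRowAt (T.set j ((pvRowAt T j).insert a "X")) j).getD a "" = "X" := by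
        rw [pv_getD_set, if_pos ⟨rfl, hje⟩, hrow a, if_pos rfl]
      rw [hii, hjj]
  · -- j is "X", i is not: set row i
    have hstep : pvPairAttr i j a (T, ch) = (T.set i ((pvRowAt T i).insert a "X"), true) := by
      rw [pv_pairAttr_reduce, if_neg (by tauto), if_pos ⟨h2, h1⟩]
    rw [hstep]
    have horigi : (pvRowAt tbl i).getD a "" ≠ "X" := by
      rcases I3 i a with h | ⟨h, _⟩
      · rw [← h]; exact h1
      · exact absurd h h1
    have hflagi : pvFlag lhs rhs tbl (pvRowAt tbl i) a = true := flag_of_cur j hj h2 i hkeq.symm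
    have hrow : ∀ b, ((pvRowAt T i).insert a "X").getD b "" =
        if b = a then "X" else (pvRowAt T i).getD b "" := by
      intro b; rw [PySem.Dict.getD_insert]
    have hie : i < T.length := by rw [I1]; exact hi
    have hmono : ∀ k b, (pvRowAt T k).getD b "" = "X" →
        (pvRowAt (T.set i ((pvRowAt T i).insert a "X")) k).getD b "" = "X" := by
      apply mono_set
      intro b; rw [hrow b]; split_ifs with h
      · exact Or.inr rfl
      · exact Or.inl rfl
    refine ⟨⟨by simpa using I1, ?_, ?_, ?_, ?_⟩, ?_⟩
    · intro k
      rw [pv_getD_set]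
      split_ifs with h
      · rw [PySem.Dict.keys_insert_of_contains _ _ hcti, h.1, I2 i]
      · exact I2 k
    · intro k b
      rw [pv_getD_set]
      split_ifs with h
      · rw [hrow b]
        split_ifs with hba
        · subst hba; rw [h.1]; exact Or.inr ⟨rfl, hflagi⟩
        · rw [h.1]; exact I3 i b
      · exact I3 k b
    · intro p q hD hpq hq hkpq b hb hX
      obtain ⟨hXp, hXq⟩ := I4 p q hD hpq hq hkpq b hb hX
      exact ⟨hmono p b hXp, hmono q b hXq⟩
    · simp only
      constructor
      · intro _
        right
        refine ⟨i, a, ?_⟩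
        rw [pv_getD_set, if_pos ⟨rfl, hie⟩, hrow a, if_pos rfl]
        exact fun h => horigi h.symm
      · intro _; trivial
    · simp only
      have hii : (pvRowAt (T.set i ((pvRowAt T i).insert a "X")) i).getD a "" = "X" := by
        rw [pv_getD_set, if_pos ⟨rfl, hie⟩, hrow a, if_pos rfl]
      have hjj : (pvRowAt (T.set i ((pvRowAt T i).insert a "X")) j).getD a "" = "X" := by
        rw [pv_getD_set, if_neg (fun h => hij' h.1.symm)]
        exact h2
      rw [hii, hjj]
  · -- neither is "X": no change
    have : pvPairAttr i j a (T, ch) = (T, ch) := by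
      rw [pv_pairAttr_reduce, if_neg (by tauto), if_neg (by tauto)]
    rw [this]
    refine ⟨⟨I1, I2, I3, I4, I6⟩, ?_⟩
    simp only
    constructor
    · intro h; exact absurd h h1
    · intro h; exact absurd h h2

theorem pv_pairAttr_mono (i j : Nat) (a : String) (st : List (PySem.Dict String String) × Bool)
    (k : Nat) (b : String) (h : (pvRowAt st.1 k).getD b "" = "X") :
    (pvRowAt (pvPairAttr i j a st).1 k).getD b "" = "X" := by
  obtain ⟨T, ch⟩ := st
  rw [pv_pairAttr_reduce]
  split_ifs with hc1 hc2 <;> simp only at h ⊢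
  · rw [pv_getD_set]
    split_ifs with hk
    · rw [PySem.Dict.getD_insert]
      split_ifs with hba
      · rfl
      · rw [← hk.1]; exact h
    · exact h
  · rw [pv_getD_set]
    split_ifs with hk
    · rw [PySem.Dict.getD_insert]
      split_ifs with hba
      · rfl
      · rw [← hk.1]; exact h
    · exact h
  · exact h

theorem pv_attrFold_mono (i j : Nat) (rs : List String) (st : List (PySem.Dict String String) × Bool)
    (k : Nat) (b : String) (h : (pvRowAt st.1 k).getD b "" = "X") :
    (pvRowAt (rs.foldl (fun st a => pvPairAttr i j a st) st).1 k).getD b "" = "X" := by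
  induction rs generalizing st with
  | nil => exact h
  | cons a rs ih =>
    simp only [List.foldl_cons]
    exact ih _ (pv_pairAttr_mono i j a st k b h)

theorem pv_attrFold_inv (lhs rhs : List String) (tbl : List (PySem.Dict String String))
    (hok : pvRowsOK lhs rhs tbl) (D : Nat → Nat → Prop) (c0 : Bool) (i j : Nat)
    (hij : i < j) (hj : j < tbl.length)
    (hkeq : pvKey lhs (pvRowAt tbl i) = pvKey lhs (pvRowAt tbl j)) :
    ∀ (rs : List String), (∀ a ∈ rs, a ∈ rhs) →
    ∀ (st : List (PySem.Dict String String) × Bool), InvA lhs rhs tbl D st c0 →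
    InvA lhs rhs tbl D (rs.foldl (fun st a => pvPairAttr i j a st) st) c0 ∧
    (∀ a ∈ rs, ((pvRowAt tbl i).getD a "" = "X" ∨ (pvRowAt tbl j).getD a "" = "X") →
      ((pvRowAt (rs.foldl (fun st a => pvPairAttr i j a st) st).1 i).getD a "" = "X" ∧
       (pvRowAt (rs.foldl (fun st a => pvPairAttr i j a st) st).1 j).getD a "" = "X")) := by
  intro rs
  induction rs with
  | nil => intro _ st hInv; exact ⟨hInv, by intro a ha; cases ha⟩
  | cons a rs ih =>
    intro hrs st hInv
    have ha : a ∈ rhs := hrs a List.mem_cons_self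
    obtain ⟨hInv1, hiff⟩ := pv_pairAttr_inv lhs rhs tbl hok D c0 i j hij hj a ha hkeq st hInv
    obtain ⟨hInv', hcomp'⟩ := ih (fun b hb => hrs b (List.mem_cons_of_mem _ hb)) _ hInv1
    simp only [List.foldl_cons]
    refine ⟨hInv', ?_⟩
    intro b hb hX
    rcases List.mem_cons.mp hb with rfl | hb
    · -- head attribute: after its own step both sides are "X"; they stay "X" through the rest
      have hsides : (pvRowAt (pvPairAttr i j b st).1 i).getD b "" = "X" ∧
          (pvRowAt (pvPairAttr i j b st).1 j).getD b "" = "X" := by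
        rcases hX with hX | hX
        · have h1 : (pvRowAt (pvPairAttr i j b st).1 i).getD b "" = "X" :=
            pv_sound_mono hInv1.2.2.1 i b hX
          exact ⟨h1, hiff.mp h1⟩
        · have h2 : (pvRowAt (pvPairAttr i j b st).1 j).getD b "" = "X" :=
            pv_sound_mono hInv1.2.2.1 j b hX
          exact ⟨hiff.mpr h2, h2⟩
      exact ⟨pv_attrFold_mono i j rs _ i b hsides.1, pv_attrFold_mono i j rs _ j b hsides.2⟩
    · exact hcomp' b hb hX

theorem pv_InvA_mono {lhs rhs : List String} {tbl : List (PySem.Dict String String)}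
    {D D' : Nat → Nat → Prop} {st : List (PySem.Dict String String) × Bool} {c0 : Bool}
    (h : ∀ p q, D' p q → D p q) (hInv : InvA lhs rhs tbl D st c0) : InvA lhs rhs tbl D' st c0 :=
  ⟨hInv.1, hInv.2.1, hInv.2.2.1, fun p q hD' => hInv.2.2.2.1 p q (h p q hD'), hInv.2.2.2.2⟩

theorem pv_pairA_reduce (lhs rhs : List String) (i j : Nat)
    (T : List (PySem.Dict String String)) (ch : Bool) :
    pvPairA lhs rhs i j (T, ch) =
      if j ≤ i then (T, ch)
      else if lhs.all (fun a => (pvRowAt T i).getD a "" == (pvRowAt T j).getD a "") then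
        rhs.foldl (fun st a => pvPairAttr i j a st) (T, ch)
      else (T, ch) := by
  simp [pvPairA, pvRowAt]

theorem pv_pairA_inv (lhs rhs : List String) (tbl : List (PySem.Dict String String))
    (hok : pvRowsOK lhs rhs tbl) (D : Nat → Nat → Prop) (c0 : Bool) (i j : Nat)
    (hi : i < tbl.length) (hj : j < tbl.length)
    (st : List (PySem.Dict String String) × Bool) (hInv : InvA lhs rhs tbl D st c0) :
    InvA lhs rhs tbl (fun p q => D p q ∨ (p = i ∧ q = j)) (pvPairA lhs rhs i j st) c0 := by
  obtain ⟨T, ch⟩ := st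
  rw [pv_pairA_reduce]
  split_ifs with hji hall
  · -- i >= j: skipped pair, and the new pair has p < q false
    refine ⟨hInv.1, hInv.2.1, hInv.2.2.1, ?_, hInv.2.2.2.2⟩
    rintro p q (hD | ⟨rfl, rfl⟩) hpq hq hkpq b hb hX
    · exact hInv.2.2.2.1 p q hD hpq hq hkpq b hb hX
    · omega
  · -- lhs values agree: the rhs fold runs
    have hij : i < j := by omega
    have hkeq : pvKey lhs (pvRowAt tbl i) = pvKey lhs (pvRowAt tbl j) := by
      have h1 := pv_key_static (rhs := rhs) hInv.2.2.1 i
      have h2 := pv_key_static (rhs := rhs) hInv.2.2.1 j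
      rw [← h1, ← h2]
      simp only [List.all_eq_true] at hall
      exact List.map_congr_left (fun b hb => beq_iff_eq.mp (hall b hb))
    obtain ⟨hInv', hcomp⟩ := pv_attrFold_inv lhs rhs tbl hok D c0 i j hij hj hkeq rhs
      (fun _ h => h) (T, ch) hInv
    refine ⟨hInv'.1, hInv'.2.1, hInv'.2.2.1, ?_, hInv'.2.2.2.2⟩
    rintro p q (hD | ⟨rfl, rfl⟩) hpq hq hkpq b hb hX
    · exact hInv'.2.2.2.1 p q hD hpq hq hkpq b hb hX
    · exact hcomp b hb hX
  · -- lhs values disagree: skipped, and the new pair's key hypothesis is false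
    have hij : i < j := by omega
    refine ⟨hInv.1, hInv.2.1, hInv.2.2.1, ?_, hInv.2.2.2.2⟩
    rintro p q (hD | ⟨rfl, rfl⟩) hpq hq hkpq b hb hX
    · exact hInv.2.2.2.1 p q hD hpq hq hkpq b hb hX
    · exfalso
      apply hall
      have h1 := pv_key_static (rhs := rhs) hInv.2.2.1 p
      have h2 := pv_key_static (rhs := rhs) hInv.2.2.1 q
      have : pvKey lhs (pvRowAt T p) = pvKey lhs (pvRowAt T q) := by rw [h1, h2, hkpq]
      simp only [List.all_eq_true]
      intro b hb
      exact beq_iff_eq.mpr (pv_map_eq_forall this b hb)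

theorem pv_innerLoop (lhs rhs : List String) (tbl : List (PySem.Dict String String))
    (hok : pvRowsOK lhs rhs tbl) (c0 : Bool) (i : Nat) (hi : i < tbl.length) :
    ∀ (js : List Nat), (∀ j ∈ js, j < tbl.length) →
    ∀ (D : Nat → Nat → Prop) (st : List (PySem.Dict String String) × Bool),
      InvA lhs rhs tbl D st c0 →
      InvA lhs rhs tbl (fun p q => D p q ∨ (p = i ∧ q ∈ js))
        (js.foldl (fun st j => pvPairA lhs rhs i j st) st) c0 := by
  intro js
  induction js with
  | nil =>
    intro _ D st hInv
    exact pv_InvA_mono (by rintro p q (hD | ⟨_, h⟩); exact hD; cases h) hInv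
  | cons j js ih =>
    intro hjs D st hInv
    have hj : j < tbl.length := hjs j List.mem_cons_self
    have h1 := pv_pairA_inv lhs rhs tbl hok D c0 i j hi hj st hInv
    have h2 := ih (fun j' hj' => hjs j' (List.mem_cons_of_mem _ hj'))
      (fun p q => D p q ∨ (p = i ∧ q = j)) _ h1
    simp only [List.foldl_cons]
    refine pv_InvA_mono ?_ h2
    rintro p q (hD | ⟨rfl, hq⟩)
    · exact Or.inl (Or.inl hD)
    · rcases List.mem_cons.mp hq with rfl | hq
      · exact Or.inl (Or.inr ⟨rfl, rfl⟩)
      · exact Or.inr ⟨rfl, hq⟩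

theorem pv_outerLoop (lhs rhs : List String) (tbl : List (PySem.Dict String String))
    (hok : pvRowsOK lhs rhs tbl) (c0 : Bool) :
    ∀ (is : List Nat), (∀ i ∈ is, i < tbl.length) →
    ∀ (D : Nat → Nat → Prop) (st : List (PySem.Dict String String) × Bool),
      InvA lhs rhs tbl D st c0 →
      InvA lhs rhs tbl (fun p q => D p q ∨ (p ∈ is ∧ q < tbl.length))
        (is.foldl (fun st i => (List.range st.1.length).foldl (fun st j => pvPairA lhs rhs i j st) st) st) c0 := by
  intro is
  induction is with
  | nil =>
    intro _ D st hInv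
    exact pv_InvA_mono (by rintro p q (hD | ⟨h, _⟩); exact hD; cases h) hInv
  | cons i is ih =>
    intro his D st hInv
    have hi : i < tbl.length := his i List.mem_cons_self
    simp only [List.foldl_cons]
    rw [hInv.1]
    have h1 := pv_innerLoop lhs rhs tbl hok c0 i hi (List.range tbl.length)
      (fun j hj => List.mem_range.mp hj) D st hInv
    have h2 := ih (fun i' hi' => his i' (List.mem_cons_of_mem _ hi'))
      (fun p q => D p q ∨ (p = i ∧ q ∈ List.range tbl.length)) _ h1
    refine pv_InvA_mono ?_ h2
    rintro p q (hD | ⟨hp, hq⟩)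
    · exact Or.inl (Or.inl hD)
    · rcases List.mem_cons.mp hp with rfl | hp
      · exact Or.inl (Or.inr ⟨rfl, List.mem_range.mpr hq⟩)
      · exact Or.inr ⟨hp, hq⟩

theorem pv_rowAt_getElem (tbl : List (PySem.Dict String String)) (k : Nat) (hk : k < tbl.length) :
    pvRowAt tbl k = tbl[k] := by
  rw [pvRowAt, List.getD_eq_getElem?_getD, List.getElem?_eq_getElem hk]
  rfl

theorem pv_rowAt_of_ge (tbl : List (PySem.Dict String String)) (k : Nat) (hk : tbl.length ≤ k) :
    pvRowAt tbl k = PySem.Dict.empty := by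
  rw [pvRowAt, List.getD_eq_getElem?_getD, List.getElem?_eq_none hk]
  rfl

theorem pvPassA_spec (lhs rhs : List String) (tbl : List (PySem.Dict String String)) (c : Bool)
    (hok : pvRowsOK lhs rhs tbl) :
    pvPassA lhs rhs (tbl, c) = (pvSpecTbl lhs rhs tbl, c || pvChSpec lhs rhs tbl) := by
  have hinit : InvA lhs rhs tbl (fun _ _ => False) (tbl, c) c := by
    refine ⟨rfl, fun _ => rfl, fun k a => Or.inl rfl, fun p q h => absurd h (by exact fun h => h), ?_⟩
    constructor
    · exact fun h => Or.inl h
    · rintro (h | ⟨k, a, hne⟩)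
      · exact h
      · exact absurd rfl hne
  have hfin := pv_outerLoop lhs rhs tbl hok c (List.range tbl.length)
    (fun i hi => List.mem_range.mp hi) _ (tbl, c) hinit
  have hpass : pvPassA lhs rhs (tbl, c) =
      (List.range tbl.length).foldl
        (fun st i => (List.range st.1.length).foldl (fun st j => pvPairA lhs rhs i j st) st) (tbl, c) := rfl
  rw [hpass]
  set stf := (List.range tbl.length).foldl
      (fun st i => (List.range st.1.length).foldl (fun st j => pvPairA lhs rhs i j st) st) (tbl, c) with hstf
  obtain ⟨I1, I2, I3, I4, I6⟩ := hfin
  have I4' : ∀ p q, p < q → q < tbl.length →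
      pvKey lhs (pvRowAt tbl p) = pvKey lhs (pvRowAt tbl q) →
      ∀ a ∈ rhs, ((pvRowAt tbl p).getD a "" = "X" ∨ (pvRowAt tbl q).getD a "" = "X") →
        ((pvRowAt stf.1 p).getD a "" = "X" ∧ (pvRowAt stf.1 q).getD a "" = "X") := by
    intro p q hpq hq
    exact I4 p q (Or.inr ⟨List.mem_range.mpr (lt_trans hpq hq), hq⟩) hpq hq
  -- each final row equals the spec row
  have hrow : ∀ k, k < tbl.length → pvRowAt stf.1 k = pvSpecRow lhs rhs tbl (pvRowAt tbl k) := by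
    intro k hk
    apply pv_dict_eq_of_keys_getD
    · rw [pvSpecRow, pv_keys_setXs]; exact I2 k
    · rw [I2 k]; exact pv_nodup_rowAt hok hk
    · intro a
      rw [pvSpecRow, pv_getD_setXs]
      by_cases hc : (pvRowAt tbl k).contains a = true
      · rw [if_pos hc]
        by_cases hf : pvFlag lhs rhs tbl (pvRowAt tbl k) a = true
        · rw [if_pos hf]
          have hf' : (rhs.contains a && pvHasX lhs tbl (pvRowAt tbl k) a) = true := hf
          obtain ⟨har, hhx⟩ := pv_and_true hf'
          have ha : a ∈ rhs := pv_contains_list.mp har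
          rw [pvHasX, List.any_eq_true] at hhx
          obtain ⟨m, hm, hmx⟩ := hhx
          obtain ⟨hkm, hXm⟩ := pv_and_true hmx
          have hkeq : pvKey lhs m = pvKey lhs (pvRowAt tbl k) := beq_iff_eq.mp hkm
          have hXm' : m.getD a "" = "X" := beq_iff_eq.mp hXm
          obtain ⟨q, hq, hqm⟩ := List.mem_iff_getElem.mp hm
          have hmq : m = pvRowAt tbl q := by rw [pv_rowAt_getElem tbl q hq, hqm]
          rw [hmq] at hkeq hXm'
          by_cases hqk : q = k
          · subst hqk
            exact pv_sound_mono I3 q a hXm'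
          · rcases Nat.lt_or_ge q k with hlt | hge
            · exact (I4' q k hlt hk hkeq a ha (Or.inl hXm')).2
            · have hlt : k < q := by omega
              exact (I4' k q hlt hq hkeq.symm a ha (Or.inr hXm')).1
        · rw [if_neg hf]
          rcases I3 k a with h | ⟨_, hfl⟩
          · exact h
          · exact absurd hfl hf
      · rw [if_neg hc]
        rcases I3 k a with h | ⟨_, hfl⟩
        · rw [h]
          exact PySem.Dict.getD_of_not_contains _ _ (eq_false_of_ne_true hc)
        · exfalso
          have hf' : (rhs.contains a && pvHasX lhs tbl (pvRowAt tbl k) a) = true := hfl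
          exact hc (pv_contains_rowAt hok hk (Or.inr (pv_contains_list.mp (pv_and_true hf').1)))
  -- the final table is the spec table
  have htbl : stf.1 = pvSpecTbl lhs rhs tbl := by
    apply List.ext_getElem
    · simp [pvSpecTbl, I1]
    · intro k hk1 hk2
      have hk : k < tbl.length := by rw [I1] at hk1; exact hk1
      simp only [pvSpecTbl, List.getElem_map]
      rw [← pv_rowAt_getElem stf.1 k hk1, ← pv_rowAt_getElem tbl k hk]
      exact hrow k hk
  -- the changed flag
  have hdiff : (∃ k a, (pvRowAt stf.1 k).getD a "" ≠ (pvRowAt tbl k).getD a "")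
      ↔ pvChSpec lhs rhs tbl = true := by
    constructor
    · rintro ⟨k, a, hne⟩
      by_cases hk : k < tbl.length
      · rw [hrow k hk, pvSpecRow, pv_getD_setXs] at hne
        by_cases hc : (pvRowAt tbl k).contains a = true
        · rw [if_pos hc] at hne
          by_cases hf : pvFlag lhs rhs tbl (pvRowAt tbl k) a = true
          · rw [if_pos hf] at hne
            have hf' : (rhs.contains a && pvHasX lhs tbl (pvRowAt tbl k) a) = true := hf
            obtain ⟨har, hhx⟩ := pv_and_true hf'
            rw [pvChSpec, List.any_eq_true]
            refine ⟨pvRowAt tbl k, ?_, ?_⟩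
            · rw [pv_rowAt_getElem tbl k hk]; exact List.getElem_mem hk
            · rw [List.any_eq_true]
              refine ⟨a, pv_contains_list.mp har, ?_⟩
              rw [hhx]
              simp only [Bool.true_and]
              have : (pvRowAt tbl k).getD a "" ≠ "X" := fun h => hne (by rw [h])
              simpa using this
          · rw [if_neg hf] at hne
            exact absurd rfl hne
        · rw [if_neg hc] at hne
          rw [PySem.Dict.getD_of_not_contains _ _ (eq_false_of_ne_true hc)] at hne
          exact absurd rfl hne
      · rw [pv_rowAt_of_ge stf.1 k (by rw [I1]; omega), pv_rowAt_of_ge tbl k (by omega)] at hne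
        exact absurd rfl hne
    · intro h
      rw [pvChSpec, List.any_eq_true] at h
      obtain ⟨r, hr, h2⟩ := h
      rw [List.any_eq_true] at h2
      obtain ⟨a, ha, h3⟩ := h2
      obtain ⟨hhx, hnX⟩ := pv_and_true h3
      have hnX' : r.getD a "" ≠ "X" := by simpa using hnX
      obtain ⟨k, hk, hkr⟩ := List.mem_iff_getElem.mp hr
      have hkr' : r = pvRowAt tbl k := by rw [pv_rowAt_getElem tbl k hk, hkr]
      refine ⟨k, a, ?_⟩
      rw [hrow k hk, pvSpecRow, pv_getD_setXs]
      have hc : (pvRowAt tbl k).contains a = true := pv_contains_rowAt hok hk (Or.inr ha)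
      have hf : pvFlag lhs rhs tbl (pvRowAt tbl k) a = true := by
        show (rhs.contains a && pvHasX lhs tbl (pvRowAt tbl k) a) = true
        rw [pv_contains_list.mpr ha, ← hkr', hhx]
        rfl
      rw [if_pos hc, if_pos hf]
      rw [← hkr']
      exact fun h => hnX' h.symm
  have hch : stf.2 = (c || pvChSpec lhs rhs tbl) := by
    rw [Bool.eq_iff_iff, I6, hdiff]
    simp
  calc stf = (stf.1, stf.2) := rfl
    _ = (pvSpecTbl lhs rhs tbl, c || pvChSpec lhs rhs tbl) := by rw [htbl, hch]

def pvTblOK (attrs : List String) (tbl : List (PySem.Dict String String)) : Prop :=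
  ∀ r ∈ tbl, r.keys = PySem.Set.ofList attrs

theorem pv_rowsOK_of (attrs lhs rhs : List String) (tbl : List (PySem.Dict String String))
    (h : pvTblOK attrs tbl) (hl : ∀ a ∈ lhs, a ∈ attrs) (hr : ∀ a ∈ rhs, a ∈ attrs) :
    pvRowsOK lhs rhs tbl := by
  constructor
  · intro r hrm; rw [h r hrm]; exact PySem.Set.nodup_ofList _
  · intro r hrm a ha
    rw [PySem.Dict.contains_eq_decide_mem_keys, h r hrm]
    have hm : a ∈ attrs := by
      rcases ha with ha | ha
      · exact hl a ha
      · exact hr a ha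
    simp [(PySem.Set.mem_ofList _ _).mpr hm]

theorem pv_TblOK_spec (attrs lhs rhs : List String) (tbl : List (PySem.Dict String String))
    (h : pvTblOK attrs tbl) : pvTblOK attrs (pvSpecTbl lhs rhs tbl) := by
  intro r hr
  rw [pvSpecTbl] at hr
  obtain ⟨r0, hr0, rfl⟩ := List.mem_map.mp hr
  rw [pvSpecRow, pv_keys_setXs]
  exact h r0 hr0

theorem pv_table_TblOK (attrs : List String) (decom : List (List String)) :
    pvTblOK attrs (pvTable attrs decom) := by
  intro r hr
  rw [pvTable] at hr
  obtain ⟨p, _, rfl⟩ := List.mem_map.mp hr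
  rw [PySem.Dict.keys_foldl_insert attrs (fun d a => pvRowVal p.2 p.1 a) PySem.Dict.empty]
  rw [PySem.Dict.keys_empty]
  exact PySem.Set.update_nil_left attrs

theorem pv_fold_eq (attrs : List String) :
    ∀ (FD : List (List String × List String)) (tbl : List (PySem.Dict String String)) (c : Bool),
    (∀ p ∈ FD, (∀ a ∈ p.1, a ∈ attrs) ∧ (∀ a ∈ p.2, a ∈ attrs)) → pvTblOK attrs tbl →
    FD.foldl (fun st p => pvPassA p.1 p.2 st) (tbl, c) = FD.foldl (fun st p => pvPassB p.1 p.2 st) (tbl, c)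
    ∧ pvTblOK attrs (FD.foldl (fun st p => pvPassA p.1 p.2 st) (tbl, c)).1 := by
  intro FD
  induction FD with
  | nil => intro tbl c _ hOK; exact ⟨rfl, hOK⟩
  | cons p FD ih =>
    intro tbl c hF hOK
    have hp := hF p List.mem_cons_self
    have hok : pvRowsOK p.1 p.2 tbl := pv_rowsOK_of attrs p.1 p.2 tbl hOK hp.1 hp.2
    simp only [List.foldl_cons]
    rw [pvPassA_spec p.1 p.2 tbl c hok, pvPassB_spec p.1 p.2 tbl c hok]
    exact ih _ _ (fun q hq => hF q (List.mem_cons_of_mem _ hq))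
      (pv_TblOK_spec attrs p.1 p.2 tbl hOK)

theorem pv_loop_eq (attrs : List String) (FD : List (List String × List String))
    (hF : ∀ p ∈ FD, (∀ a ∈ p.1, a ∈ attrs) ∧ (∀ a ∈ p.2, a ∈ attrs)) :
    ∀ (fuel : Nat) (tbl : List (PySem.Dict String String)), pvTblOK attrs tbl →
    pvLoopA FD fuel tbl = pvLoopB FD fuel tbl := by
  intro fuel
  induction fuel with
  | zero => intro tbl _; rfl
  | succ fuel ih =>
    intro tbl hOK
    obtain ⟨heq, hOK'⟩ := pv_fold_eq attrs FD tbl false hF hOK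
    show (let st := FD.foldl (fun st p => pvPassA p.1 p.2 st) (tbl, false)
          if pvAllX st.1 then (true, st.1) else if st.2 then pvLoopA FD fuel st.1 else (false, st.1))
       = (let st := FD.foldl (fun st p => pvPassB p.1 p.2 st) (tbl, false)
          if pvAllX st.1 then (true, st.1) else if st.2 then pvLoopB FD fuel st.1 else (false, st.1))
    rw [← heq]
    simp only
    split_ifs with h1 h2
    · rfl
    · rw [ih _ hOK']
    · rfl

-- ===== VERDICT (by name: the statement is the Claim_ definition above) =====
theorem pv_passA_nil (lhs rhs : List String) (c : Bool) : pvPassA lhs rhs ([], c) = ([], c) := by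
  simp [pvPassA]

theorem pv_passB_nil (lhs rhs : List String) (c : Bool) : pvPassB lhs rhs ([], c) = ([], c) := rfl

theorem pv_foldA_nil (FD : List (List String × List String)) (c : Bool) :
    FD.foldl (fun st p => pvPassA p.1 p.2 st) ([], c) = ([], c) := by
  induction FD with
  | nil => rfl
  | cons p FD ih => simp only [List.foldl_cons, pv_passA_nil]; exact ih

theorem pv_foldB_nil (FD : List (List String × List String)) (c : Bool) :
    FD.foldl (fun st p => pvPassB p.1 p.2 st) ([], c) = ([], c) := by
  induction FD with
  | nil => rfl
  | cons p FD ih => simp only [List.foldl_cons, pv_passB_nil]; exact ih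

theorem pv_loop_nil (FD : List (List String × List String)) (fuel : Nat) :
    pvLoopA FD fuel [] = pvLoopB FD fuel [] := by
  cases fuel with
  | zero => rfl
  | succ fuel =>
    show (let st := FD.foldl (fun st p => pvPassA p.1 p.2 st) ([], false)
          if pvAllX st.1 then (true, st.1) else if st.2 then pvLoopA FD fuel st.1 else (false, st.1))
       = (let st := FD.foldl (fun st p => pvPassB p.1 p.2 st) ([], false)
          if pvAllX st.1 then (true, st.1) else if st.2 then pvLoopB FD fuel st.1 else (false, st.1))
    rw [pv_foldA_nil, pv_foldB_nil]
    simp [pvAllX]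

theorem lossless_chase_spec : Claim_equal_lossless_chase := by
  intro attrs FD decom _ hpre
  show lossless_chase attrs FD decom = lossless_chase_alt attrs FD decom
  rcases hpre with rfl | hpre
  · simp only [lossless_chase, lossless_chase_alt]
    have htn : pvTable (PySem.List.sorted attrs (fun x => x) false) [] = [] := rfl
    rw [htn, pv_loop_nil]
  have hOK := pv_table_TblOK (PySem.List.sorted attrs (fun x => x) false) decom
  have hF : ∀ p ∈ FD, (∀ a ∈ p.1, a ∈ PySem.List.sorted attrs (fun x => x) false) ∧
      (∀ a ∈ p.2, a ∈ PySem.List.sorted attrs (fun x => x) false) := by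
    intro p hp
    exact ⟨fun a ha => (PySem.List.mem_sorted _ _ _ _).mpr ((hpre p hp).1 a ha),
           fun a ha => (PySem.List.mem_sorted _ _ _ _).mpr ((hpre p hp).2 a ha)⟩
  simp only [lossless_chase, lossless_chase_alt]
  rw [pv_loop_eq (PySem.List.sorted attrs (fun x => x) false) FD hF _ _ hOK]
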